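-- pv_equiv track=rewrite | github.com/RakeshBR1999/DSA | array/easy/validate-suduko.py | isValidGroup
-- ===== SOURCE A (Python) =====
-- def isValidGroup(group):
--     seen = set()
--     for num in group:
--         if num != '.':
--             if num in seen:
--                 return False
--             seen.add(num)
--     return True
-- ===== SOURCE B (Python) =====
-- def isValidGroup(group):
--     vals = sorted(x for x in group if x != '.')
--     return all(a != b for a, b in zip(vals, vals[1:]))
-- ===== Notes on version B (the rewrite author's own statement) =====
-- stated objective: alternative
-- what changed: B sorts the non-'.' values and checks that no two adjacent sorted values are equal, replacing A's hash-set membership loop with a sort-then-adjacent-scan duplicate detection.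
import Mathlib
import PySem

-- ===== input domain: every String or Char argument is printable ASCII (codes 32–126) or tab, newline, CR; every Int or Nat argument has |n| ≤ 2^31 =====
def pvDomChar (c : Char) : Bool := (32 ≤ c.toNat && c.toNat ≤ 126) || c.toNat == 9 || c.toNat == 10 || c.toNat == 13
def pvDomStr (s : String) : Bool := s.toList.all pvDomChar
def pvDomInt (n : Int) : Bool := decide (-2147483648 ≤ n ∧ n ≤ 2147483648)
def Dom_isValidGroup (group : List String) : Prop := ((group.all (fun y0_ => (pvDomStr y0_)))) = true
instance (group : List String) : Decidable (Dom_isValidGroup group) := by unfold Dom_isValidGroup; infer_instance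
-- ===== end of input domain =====

-- B detects duplicates by sorting the non-'.' values and scanning adjacent pairs,
-- instead of A's incremental seen-set with early return; same behaviour, no speed claim.

-- ===== PORT A =====
def isValidGroupAux (seen : PySem.Set String) : List String → Bool
  | [] => true
  | num :: rest =>
    if num ≠ "." then
      if PySem.Set.contains seen num then false
      else isValidGroupAux (PySem.Set.add seen num) rest
    else isValidGroupAux seen rest

def isValidGroup (group : List String) : Bool :=
  isValidGroupAux PySem.Set.empty group

-- ===== PORT B =====
def isValidGroup_alt (group : List String) : Bool :=
  let vals := PySem.List.sorted (group.filter (fun x => x ≠ ".")) (fun x => x) false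
  (vals.zip (PySem.List.slice vals (some 1) none)).all (fun p => p.1 ≠ p.2)

-- ===== PRECONDITION & SPEC =====
def Spec_isValidGroup (group : List String) (out : Bool) : Prop := out = isValidGroup_alt group
instance (group : List String) (out : Bool) : Decidable (Spec_isValidGroup group out) := by unfold Spec_isValidGroup; infer_instance

-- ===== CLAIM (what is proved, stated in full; the proofs are below) =====
def Claim_equal_isValidGroup : Prop := ∀ (group : List String), Dom_isValidGroup group → Spec_isValidGroup group (isValidGroup group)

-- ===== LEMMAS AND PROOFS =====

-- A's loop, relative to an arbitrary already-seen set: it returns true iff the non-'.'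
-- values are pairwise distinct and none of them is already in `seen`.
theorem isValidGroupAux_true_iff (group : List String) (seen : List String) :
    isValidGroupAux seen group = true ↔
      ((group.filter (fun x => x ≠ ".")).Nodup ∧
       ∀ x ∈ group.filter (fun x => x ≠ "."), x ∉ seen) := by
  induction group generalizing seen with
  | nil => simp [isValidGroupAux]
  | cons num rest ih =>
    by_cases hdot : num = "."
    · simp [isValidGroupAux, hdot, ih]
    · by_cases hmem : num ∈ seen
      · rw [isValidGroupAux, if_pos (by simp [hdot]),
            if_pos ((PySem.Set.contains_iff seen num).mpr hmem)]
        simp only [Bool.false_eq_true, false_iff, not_and]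
        intro _ h
        exact absurd hmem (h num (by simp [hdot]))
      · rw [isValidGroupAux]
        rw [if_pos (by simp [hdot]), if_neg (by simp [hmem]), ih,
          PySem.Set.add_of_not_mem hmem]
        rw [List.filter_cons_of_pos (by simp [hdot])]
        simp only [List.nodup_cons, List.mem_cons, List.mem_append,
          not_or, forall_eq_or_imp, List.mem_filter,
          decide_eq_true_eq, and_imp, List.not_mem_nil, or_false]
        constructor
        · rintro ⟨hnd, hall⟩
          exact ⟨⟨fun h => (hall num h.1 h.2).2 rfl, hnd⟩, hmem,
            fun a ha hne => (hall a ha hne).1⟩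
        · rintro ⟨⟨hn, hnd⟩, -, hall⟩
          exact ⟨hnd, fun x hx hne => ⟨hall x hx hne, fun h => hn ⟨h ▸ hx, h ▸ hne⟩⟩⟩

-- On a list sorted in nondecreasing order, "no two adjacent elements are equal"
-- is exactly "no duplicates at all".
theorem adj_ne_iff_nodup (vals : List String) (hs : vals.Pairwise (· ≤ ·)) :
    ((vals.zip vals.tail).all (fun p => p.1 ≠ p.2) = true) ↔ vals.Nodup := by
  induction vals with
  | nil => simp
  | cons x xs ih =>
    cases xs with
    | nil => simp
    | cons y t =>
      have hs' : (y :: t).Pairwise (· ≤ ·) := hs.tail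
      have hxle : ∀ z ∈ y :: t, x ≤ z := fun z hz => (List.pairwise_cons.mp hs).1 z hz
      have hyle : ∀ z ∈ t, y ≤ z := (List.pairwise_cons.mp hs').1
      rw [show ((x :: y :: t).zip (x :: y :: t).tail)
            = (x, y) :: ((y :: t).zip (y :: t).tail) from rfl,
        List.all_cons, Bool.and_eq_true, decide_eq_true_eq, ih hs']
      simp only [List.nodup_cons]
      change x ≠ y ∧ _ ↔ _
      constructor
      · rintro ⟨hxy, hy, hnd⟩
        refine ⟨?_, hy, hnd⟩
        intro hx
        rcases List.mem_cons.mp hx with rfl | hxt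
        · exact hxy rfl
        · exact hxy (le_antisymm (hxle y (by simp)) (hyle x hxt))
      · rintro ⟨hx, hy, hnd⟩
        exact ⟨fun h => hx (by simp [h]), hy, hnd⟩

-- ===== VERDICT (by name: the statement is the Claim_ definition above) =====
theorem isValidGroup_spec : Claim_equal_isValidGroup := by
  intro group _
  unfold Spec_isValidGroup isValidGroup isValidGroup_alt
  have h1 : PySem.List.slice (PySem.List.sorted (group.filter (fun x => x ≠ ".")) (fun x => x) false) (some 1) none
      = (PySem.List.sorted (group.filter (fun x => x ≠ ".")) (fun x => x) false).tail := by
    rw [show (1 : Int) = ((1 : Nat) : Int) by norm_num, PySem.List.slice_from_natCast]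
    simp [List.drop_one]
  rw [Bool.eq_iff_iff, isValidGroupAux_true_iff]
  simp only [h1]
  rw [adj_ne_iff_nodup _ (PySem.List.sorted_pairwise _ _)]
  rw [List.Perm.nodup_iff (PySem.List.sorted_perm _ _ _)]
  simp [PySem.Set.empty]
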